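-- pv_equiv track=rewrite | github.com/mstmhsmt/rrj | python/src/cca/dd/scan_oracle.py | check_cfqn
-- ===== SOURCE A (Python) =====
-- def check_cfqn(cfqn):
--     elems = []
--     upper_flag = False
--     for elem in cfqn.split('.'):
--         if upper_flag and elem[0].islower():
--             break
--         else:
--             elems.append(elem)
--
--         if not upper_flag and elem[0].isupper():
--             upper_flag = True
--
--     cfqn_ = '.'.join(elems)
--     return cfqn_
-- ===== SOURCE B (Python) =====
-- def check_cfqn(cfqn):
--     parts = cfqn.split('.')
--     u = None
--     for i in range(len(parts)):
--         if parts[i][0].isupper():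
--             u = i
--             break
--     if u is None:
--         return '.'.join(parts)
--     j = len(parts)
--     for k in range(u + 1, len(parts)):
--         if parts[k][0].islower():
--             j = k
--             break
--     return '.'.join(parts[:j])
-- ===== Notes on version B (the rewrite author's own statement) =====
-- stated objective: simpler
-- what changed: Replaces the flag-toggling accumulate-and-break loop with two find-first index searches (first uppercase-initial part, then first lowercase-initial part after it) and a single slice-and-join.
import Mathlib
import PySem

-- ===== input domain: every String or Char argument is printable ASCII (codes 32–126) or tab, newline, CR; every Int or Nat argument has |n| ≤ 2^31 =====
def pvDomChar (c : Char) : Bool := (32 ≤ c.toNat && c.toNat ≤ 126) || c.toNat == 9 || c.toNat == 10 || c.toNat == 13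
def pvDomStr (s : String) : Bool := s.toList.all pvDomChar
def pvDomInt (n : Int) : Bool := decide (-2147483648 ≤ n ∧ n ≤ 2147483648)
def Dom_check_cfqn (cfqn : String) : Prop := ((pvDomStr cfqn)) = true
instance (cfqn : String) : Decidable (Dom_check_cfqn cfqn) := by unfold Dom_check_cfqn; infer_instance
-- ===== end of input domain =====

-- B replaces A's flag-toggling accumulate-and-break loop with two find-first index
-- searches and a slice-and-join; same return value on every input where A returns (Pre_).

-- ===== PORT A =====
-- the for-loop of A: state = (elems, upper_flag); 'none' head = IndexError, unreached under Pre_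
def checkCfqnLoopA : List String → List String → Bool → List String
  | [], elems, _ => elems
  | e :: rest, elems, flag =>
    match PySem.Str.pyGet? e 0 with
    | none => elems      -- Python raises IndexError here (empty component); excluded by Pre_
    | some c =>
      if flag && PySem.Chars.islower c then elems   -- break
      else
        checkCfqnLoopA rest (elems ++ [e])
          (if !flag && PySem.Chars.isupper c then true else flag)

def check_cfqn (cfqn : String) : String :=
  let parts := (PySem.Str.split? cfqn ".").getD []
  PySem.Str.join "." (checkCfqnLoopA parts [] false)

-- ===== PORT B =====
-- first loop of B: index of the first part whose first char is uppercase
def checkCfqnFindUpper : List String → Nat → Option Nat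
  | [], _ => none
  | e :: rest, i =>
    match PySem.Str.pyGet? e 0 with
    | none => none       -- Python raises IndexError here; excluded by Pre_
    | some c => if PySem.Chars.isupper c then some i else checkCfqnFindUpper rest (i + 1)

-- second loop of B: index of the first part whose first char is lowercase
def checkCfqnFindLower : List String → Nat → Option Nat
  | [], _ => none
  | e :: rest, k =>
    match PySem.Str.pyGet? e 0 with
    | none => none       -- Python raises IndexError here; excluded by Pre_
    | some c => if PySem.Chars.islower c then some k else checkCfqnFindLower rest (k + 1)

def check_cfqn_alt (cfqn : String) : String :=
  let parts := (PySem.Str.split? cfqn ".").getD []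
  match checkCfqnFindUpper parts 0 with
  | none => PySem.Str.join "." parts
  | some u =>
    let j := match checkCfqnFindLower (parts.drop (u + 1)) (u + 1) with
             | none => parts.length
             | some k => k
    PySem.Str.join "." (parts.take j)

-- ===== PRECONDITION & SPEC =====
-- first char of s is uppercase / lowercase (false for the empty string)
def pvHeadUpper (s : String) : Bool := (PySem.Str.pyGet? s 0).elim false PySem.Chars.isupper
def pvHeadLower (s : String) : Bool := (PySem.Str.pyGet? s 0).elim false PySem.Chars.islower

-- Pre_ excludes exactly the inputs on which A raises IndexError: those whose dot-split
-- contains an empty component that the loop reaches (no uppercase-then-lowercase pair of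
-- component heads strictly before it to break out first).
def Pre_check_cfqn (cfqn : String) : Prop :=
  let parts := (PySem.Str.split? cfqn ".").getD []
  ∀ e < parts.length, parts.getD e "" = "" →
    ∃ k < e, pvHeadLower (parts.getD k "") = true ∧
      ∃ u < k, pvHeadUpper (parts.getD u "") = true

instance (cfqn : String) : Decidable (Pre_check_cfqn cfqn) := by
  unfold Pre_check_cfqn; infer_instance

def pvWitness_check_cfqn : String := "a.Bc.de"

def Spec_check_cfqn (cfqn : String) (out : String) : Prop := out = check_cfqn_alt cfqn
instance (cfqn : String) (out : String) : Decidable (Spec_check_cfqn cfqn out) := by unfold Spec_check_cfqn; infer_instance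

-- ===== CLAIM (what is proved, stated in full; the proofs are below) =====
def Claim_equal_check_cfqn : Prop := ∀ (cfqn : String), Dom_check_cfqn cfqn → Pre_check_cfqn cfqn → Spec_check_cfqn cfqn (check_cfqn cfqn)

-- ===== LEMMAS AND PROOFS =====

theorem pvHeadSome {s : String} (h : s ≠ "") :
    ∃ c, PySem.List.pyGet? s.toList 0 = some c := by
  cases hg : PySem.List.pyGet? s.toList 0 with
  | some c => exact ⟨c, rfl⟩
  | none =>
    exfalso
    rw [PySem.List.pyGet?_eq_none_iff] at hg
    have : s.toList ≠ [] := by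
      intro hn; apply h; rw [← String.ofList_toList (s := s), hn]
    have : 0 < s.toList.length := List.length_pos_iff.mpr this
    exact hg (by unfold PySem.Raise.InRange; omega)

theorem loopA_false_skip (l : List String) (acc : List String)
    (h : ∀ s ∈ l, s ≠ "" ∧ pvHeadUpper s = false) :
    checkCfqnLoopA l acc false = acc ++ l := by
  induction l generalizing acc with
  | nil => simp [checkCfqnLoopA]
  | cons e rest ih =>
    obtain ⟨hne, hu⟩ := h e (by simp)
    obtain ⟨c, hc⟩ := pvHeadSome hne
    have hcu : PySem.Chars.isupper c = false := by simpa [pvHeadUpper, hc] using hu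
    simp [checkCfqnLoopA, hc, hcu, ih _ (fun s hs => h s (by simp [hs]))]

theorem loopA_false_to_true (l1 : List String) (x : String) (l2 : List String) (acc : List String)
    (h : ∀ s ∈ l1, s ≠ "" ∧ pvHeadUpper s = false) (hx : pvHeadUpper x = true) :
    checkCfqnLoopA (l1 ++ x :: l2) acc false = checkCfqnLoopA l2 (acc ++ l1 ++ [x]) true := by
  induction l1 generalizing acc with
  | nil =>
    have hne : x ≠ "" := by
      intro hn; rw [hn] at hx; simp [pvHeadUpper, PySem.Str.pyGet?] at hx
      revert hx; decide
    obtain ⟨c, hc⟩ := pvHeadSome hne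
    have hcu : PySem.Chars.isupper c = true := by simpa [pvHeadUpper, hc] using hx
    simp [checkCfqnLoopA, hc, hcu]
  | cons e rest ih =>
    obtain ⟨hne, hu⟩ := h e (by simp)
    obtain ⟨c, hc⟩ := pvHeadSome hne
    have hcu : PySem.Chars.isupper c = false := by simpa [pvHeadUpper, hc] using hu
    have h2 := ih (acc ++ [e]) (fun s hs => h s (by simp [hs]))
    simp [checkCfqnLoopA, hc, hcu, h2]

theorem loopA_true_all (l : List String) (acc : List String)
    (h : ∀ s ∈ l, s ≠ "" ∧ pvHeadLower s = false) :
    checkCfqnLoopA l acc true = acc ++ l := by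
  induction l generalizing acc with
  | nil => simp [checkCfqnLoopA]
  | cons e rest ih =>
    obtain ⟨hne, hl⟩ := h e (by simp)
    obtain ⟨c, hc⟩ := pvHeadSome hne
    have hcl : PySem.Chars.islower c = false := by simpa [pvHeadLower, hc] using hl
    simp [checkCfqnLoopA, hc, hcl, ih _ (fun s hs => h s (by simp [hs]))]

theorem loopA_true_break (l1 : List String) (y : String) (l2 : List String) (acc : List String)
    (h : ∀ s ∈ l1, s ≠ "" ∧ pvHeadLower s = false) (hy : pvHeadLower y = true) :
    checkCfqnLoopA (l1 ++ y :: l2) acc true = acc ++ l1 := by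
  induction l1 generalizing acc with
  | nil =>
    have hne : y ≠ "" := by
      intro hn; rw [hn] at hy; simp [pvHeadLower, PySem.Str.pyGet?] at hy
      revert hy; decide
    obtain ⟨c, hc⟩ := pvHeadSome hne
    have hcl : PySem.Chars.islower c = true := by simpa [pvHeadLower, hc] using hy
    simp [checkCfqnLoopA, hc, hcl]
  | cons e rest ih =>
    obtain ⟨hne, hl⟩ := h e (by simp)
    obtain ⟨c, hc⟩ := pvHeadSome hne
    have hcl : PySem.Chars.islower c = false := by simpa [pvHeadLower, hc] using hl
    have h2 := ih (acc ++ [e]) (fun s hs => h s (by simp [hs]))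
    simp [checkCfqnLoopA, hc, hcl, h2]

theorem findUpper_none (l : List String) (i : Nat)
    (h : ∀ s ∈ l, s ≠ "" ∧ pvHeadUpper s = false) :
    checkCfqnFindUpper l i = none := by
  induction l generalizing i with
  | nil => simp [checkCfqnFindUpper]
  | cons e rest ih =>
    obtain ⟨hne, hu⟩ := h e (by simp)
    obtain ⟨c, hc⟩ := pvHeadSome hne
    have hcu : PySem.Chars.isupper c = false := by simpa [pvHeadUpper, hc] using hu
    simp [checkCfqnFindUpper, hc, hcu, ih _ (fun s hs => h s (by simp [hs]))]

theorem findUpper_some (l1 : List String) (x : String) (l2 : List String) (i : Nat)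
    (h : ∀ s ∈ l1, s ≠ "" ∧ pvHeadUpper s = false) (hx : pvHeadUpper x = true) :
    checkCfqnFindUpper (l1 ++ x :: l2) i = some (i + l1.length) := by
  induction l1 generalizing i with
  | nil =>
    have hne : x ≠ "" := by
      intro hn; rw [hn] at hx; simp [pvHeadUpper, PySem.Str.pyGet?] at hx
      revert hx; decide
    obtain ⟨c, hc⟩ := pvHeadSome hne
    have hcu : PySem.Chars.isupper c = true := by simpa [pvHeadUpper, hc] using hx
    simp [checkCfqnFindUpper, hc, hcu]
  | cons e rest ih =>
    obtain ⟨hne, hu⟩ := h e (by simp)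
    obtain ⟨c, hc⟩ := pvHeadSome hne
    have hcu : PySem.Chars.isupper c = false := by simpa [pvHeadUpper, hc] using hu
    have := ih (i + 1) (fun s hs => h s (by simp [hs]))
    simp only [checkCfqnFindUpper, List.cons_append, PySem.Str.pyGet?_eq,
      PySem.Chars.pyGet?_eq_listPyGet?] at *
    rw [hc]
    simp only [hcu, Bool.false_eq_true, if_false, this, List.length_cons]
    congr 1; omega

theorem findLower_none (l : List String) (k : Nat)
    (h : ∀ s ∈ l, s ≠ "" ∧ pvHeadLower s = false) :
    checkCfqnFindLower l k = none := by
  induction l generalizing k with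
  | nil => simp [checkCfqnFindLower]
  | cons e rest ih =>
    obtain ⟨hne, hl⟩ := h e (by simp)
    obtain ⟨c, hc⟩ := pvHeadSome hne
    have hcl : PySem.Chars.islower c = false := by simpa [pvHeadLower, hc] using hl
    simp [checkCfqnFindLower, hc, hcl, ih _ (fun s hs => h s (by simp [hs]))]

theorem findLower_some (l1 : List String) (y : String) (l2 : List String) (k : Nat)
    (h : ∀ s ∈ l1, s ≠ "" ∧ pvHeadLower s = false) (hy : pvHeadLower y = true) :
    checkCfqnFindLower (l1 ++ y :: l2) k = some (k + l1.length) := by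
  induction l1 generalizing k with
  | nil =>
    have hne : y ≠ "" := by
      intro hn; rw [hn] at hy; simp [pvHeadLower, PySem.Str.pyGet?] at hy
      revert hy; decide
    obtain ⟨c, hc⟩ := pvHeadSome hne
    have hcl : PySem.Chars.islower c = true := by simpa [pvHeadLower, hc] using hy
    simp [checkCfqnFindLower, hc, hcl]
  | cons e rest ih =>
    obtain ⟨hne, hl⟩ := h e (by simp)
    obtain ⟨c, hc⟩ := pvHeadSome hne
    have hcl : PySem.Chars.islower c = false := by simpa [pvHeadLower, hc] using hl
    have := ih (k + 1) (fun s hs => h s (by simp [hs]))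
    simp only [checkCfqnFindLower, List.cons_append, PySem.Str.pyGet?_eq,
      PySem.Chars.pyGet?_eq_listPyGet?] at *
    rw [hc]
    simp only [hcl, Bool.false_eq_true, if_false, this, List.length_cons]
    congr 1; omega


theorem dropWhile_head_false {α : Type} (q : α → Bool) (l : List α) (x : α) (xs : List α)
    (h : l.dropWhile q = x :: xs) : q x = false := by
  have := List.head?_dropWhile_not q l
  rw [h] at this; simpa using this

theorem check_cfqn_core (parts : List String)
    (hpre : ∀ e < parts.length, parts.getD e "" = "" →
      ∃ k < e, pvHeadLower (parts.getD k "") = true ∧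
        ∃ u < k, pvHeadUpper (parts.getD u "") = true) :
    PySem.Str.join "." (checkCfqnLoopA parts [] false) =
      (match checkCfqnFindUpper parts 0 with
       | none => PySem.Str.join "." parts
       | some u =>
         PySem.Str.join "." (parts.take
           (match checkCfqnFindLower (parts.drop (u + 1)) (u + 1) with
            | none => parts.length
            | some k => k))) := by
  cases hr : parts.dropWhile (fun s => !(s == "") && !(pvHeadUpper s)) with
  | nil =>
    have h2 := List.takeWhile_append_dropWhile
      (p := fun s => !(s == "") && !(pvHeadUpper s)) (l := parts)
    rw [hr, List.append_nil] at h2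
    have hall : ∀ s ∈ parts, s ≠ "" ∧ pvHeadUpper s = false := by
      intro s hs
      rw [← h2] at hs
      have := List.mem_takeWhile_imp hs
      simp at this
      exact ⟨this.1, this.2⟩
    rw [findUpper_none parts 0 hall, loopA_false_skip parts [] hall]
    simp
  | cons x l2 =>
    have hpx := dropWhile_head_false _ parts x l2 hr
    obtain ⟨l1, hl1, hsp⟩ :
        ∃ l1, (∀ s ∈ l1, s ≠ "" ∧ pvHeadUpper s = false) ∧ parts = l1 ++ x :: l2 := by
      refine ⟨parts.takeWhile (fun s => !(s == "") && !(pvHeadUpper s)), ?_, ?_⟩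
      · intro s hs
        have := List.mem_takeWhile_imp hs
        simp at this
        exact ⟨this.1, this.2⟩
      · have h2 := List.takeWhile_append_dropWhile
          (p := fun s => !(s == "") && !(pvHeadUpper s)) (l := parts)
        rw [hr] at h2; exact h2.symm
    subst hsp
    have hx : x = "" ∨ pvHeadUpper x = true := by
      by_contra hcon
      push_neg at hcon
      simp [hcon.1, hcon.2] at hpx
    rcases hx with hx | hx
    · exfalso
      have he : l1.length < (l1 ++ x :: l2).length := by simp
      obtain ⟨k, hk, hkl, u, hu, huu⟩ := hpre l1.length he
        (by rw [List.getD_append_right _ _ _ _ le_rfl]; simp [hx])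
      have hfls : pvHeadUpper ((l1 ++ x :: l2).getD u "") = false := by
        have hlt : u < l1.length := by omega
        rw [List.getD_append _ _ _ u hlt, List.getD_eq_getElem l1 "" hlt]
        exact (hl1 _ (List.getElem_mem hlt)).2
      rw [huu] at hfls; simp at hfls
    · rw [loopA_false_to_true l1 x l2 [] hl1 hx, findUpper_some l1 x l2 0 hl1 hx]
      simp only [Nat.zero_add]
      have hdrop : (l1 ++ x :: l2).drop (l1.length + 1) = l2 := by
        rw [show l1 ++ x :: l2 = (l1 ++ [x]) ++ l2 by simp, List.drop_append]
        simp
      rw [hdrop]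
      cases hr2 : l2.dropWhile (fun s => !(s == "") && !(pvHeadLower s)) with
      | nil =>
        have h2 := List.takeWhile_append_dropWhile
          (p := fun s => !(s == "") && !(pvHeadLower s)) (l := l2)
        rw [hr2, List.append_nil] at h2
        have hall2 : ∀ s ∈ l2, s ≠ "" ∧ pvHeadLower s = false := by
          intro s hs
          rw [← h2] at hs
          have := List.mem_takeWhile_imp hs
          simp at this
          exact ⟨this.1, this.2⟩
        rw [findLower_none l2 _ hall2, loopA_true_all l2 _ hall2, List.take_length]
        simp [PySem.Str.join]
      | cons y m2 =>
        have hqy := dropWhile_head_false _ l2 y m2 hr2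
        obtain ⟨m1, hm1, hsp2⟩ :
            ∃ m1, (∀ s ∈ m1, s ≠ "" ∧ pvHeadLower s = false) ∧ l2 = m1 ++ y :: m2 := by
          refine ⟨l2.takeWhile (fun s => !(s == "") && !(pvHeadLower s)), ?_, ?_⟩
          · intro s hs
            have := List.mem_takeWhile_imp hs
            simp at this
            exact ⟨this.1, this.2⟩
          · have h2 := List.takeWhile_append_dropWhile
              (p := fun s => !(s == "") && !(pvHeadLower s)) (l := l2)
            rw [hr2] at h2; exact h2.symm
        subst hsp2
        have hy : y = "" ∨ pvHeadLower y = true := by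
          by_contra hcon
          push_neg at hcon
          simp [hcon.1, hcon.2] at hqy
        rcases hy with hy | hy
        · exfalso
          have he : l1.length + 1 + m1.length < (l1 ++ x :: (m1 ++ y :: m2)).length := by
            simp; omega
          have hre : l1 ++ x :: (m1 ++ y :: m2) = (l1 ++ x :: m1) ++ y :: m2 := by simp
          have hgy : (l1 ++ x :: (m1 ++ y :: m2)).getD (l1.length + 1 + m1.length) "" = "" := by
            rw [hre, List.getD_append_right _ _ _ _ (by simp; omega)]
            have h0 : l1.length + 1 + m1.length - (l1.length + (m1.length + 1)) = 0 := by omega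
            simp [hy, h0]
          obtain ⟨k, hk, hkl, u, hu, huu⟩ := hpre _ he hgy
          have hul : l1.length ≤ u := by
            by_contra hcon
            push_neg at hcon
            have hfls : pvHeadUpper ((l1 ++ x :: (m1 ++ y :: m2)).getD u "") = false := by
              rw [List.getD_append _ _ _ u hcon, List.getD_eq_getElem l1 "" hcon]
              exact (hl1 _ (List.getElem_mem hcon)).2
            rw [huu] at hfls; simp at hfls
          have hre2 : l1 ++ x :: (m1 ++ y :: m2) = (l1 ++ [x]) ++ (m1 ++ y :: m2) := by simp
          have hfls : pvHeadLower ((l1 ++ x :: (m1 ++ y :: m2)).getD k "") = false := by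
            have hkge : (l1 ++ [x]).length ≤ k := by simp; omega
            have hklt : k - (l1 ++ [x]).length < m1.length := by simp; omega
            rw [hre2, List.getD_append_right _ _ _ _ hkge,
              List.getD_append _ _ _ _ hklt, List.getD_eq_getElem m1 "" hklt]
            exact (hm1 _ (List.getElem_mem hklt)).2
          rw [hkl] at hfls; simp at hfls
        · rw [findLower_some m1 y m2 (l1.length + 1) hm1 hy,
            loopA_true_break m1 y m2 _ hm1 hy]
          have hre : l1 ++ x :: (m1 ++ y :: m2) = (l1 ++ x :: m1) ++ y :: m2 := by simp
          have hlen : l1.length + 1 + m1.length = (l1 ++ x :: m1).length := by simp; omega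
          rw [hre, hlen, List.take_left]
          simp [PySem.Str.join]

-- ===== VERDICT (by name: the statement is the Claim_ definition above) =====
theorem check_cfqn_spec : Claim_equal_check_cfqn := by
  intro cfqn _ hpre
  unfold Pre_check_cfqn at hpre
  unfold Spec_check_cfqn check_cfqn check_cfqn_alt
  exact check_cfqn_core _ hpre
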